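-- pv_equiv track=rewrite | github.com/ibtosmlin/atcoder | work/m_solutions2020_f.py | checkUR
-- ===== SOURCE A (Python) =====
-- from collections import defaultdict
-- import bisect
--
-- INF = 10**10
--
-- def checkUR(X):
--     ret = INF
--     AU = defaultdict(list)
--     AR = defaultdict(list)
--     for x, y, u in X:
--         if u == 'U':
--             AU[y-x].append(y)
--         if u == 'L':
--             AR[y-x].append(y)
--
--     for x in AU:
--         if not x in AR: continue
--         ARX = AR[x]
--         ARX.sort()
--         ARX.append(INF)
--         for xi in AU[x]:
--             u = bisect.bisect_left(ARX, xi)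
--             if ARX[u] == INF: continue
--             ret = min(ret, (ARX[u] - xi)*10) # /0.1
--     return ret
-- ===== SOURCE B (Python) =====
-- INF = 10**10
--
-- def checkUR(X):
--     AU = {}
--     AR = {}
--     for x, y, u in X:
--         if u == 'U':
--             AU.setdefault(y - x, []).append(y)
--         elif u == 'L':
--             AR.setdefault(y - x, []).append(y)
--     ret = INF
--     for k in AU:
--         if k not in AR:
--             continue
--         ls = sorted(AR[k])
--         j = 0
--         for xi in sorted(AU[k]):
--             while j < len(ls) and ls[j] < xi:
--                 j += 1
--             if j < len(ls):
--                 ret = min(ret, (ls[j] - xi) * 10)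
--     return ret
-- ===== Notes on version B (the rewrite author's own statement) =====
-- stated objective: alternative
-- what changed: Per diagonal, B sorts the U-values as well and replaces A's per-point bisect_left lookup (with INF sentinel) by a single monotone two-pointer sweep over the two sorted lists.
import Mathlib
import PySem

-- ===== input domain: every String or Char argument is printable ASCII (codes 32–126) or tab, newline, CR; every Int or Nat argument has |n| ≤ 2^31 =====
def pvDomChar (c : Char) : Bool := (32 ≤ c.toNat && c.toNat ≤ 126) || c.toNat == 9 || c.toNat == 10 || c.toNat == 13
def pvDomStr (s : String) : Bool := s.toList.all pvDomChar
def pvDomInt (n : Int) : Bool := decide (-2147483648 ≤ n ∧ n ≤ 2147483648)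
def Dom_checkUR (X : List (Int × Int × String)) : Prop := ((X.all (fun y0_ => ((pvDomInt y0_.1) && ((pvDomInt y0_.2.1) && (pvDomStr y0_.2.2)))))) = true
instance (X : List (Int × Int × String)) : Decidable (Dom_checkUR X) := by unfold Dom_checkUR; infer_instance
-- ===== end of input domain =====

-- B replaces A's per-point bisect_left on each diagonal by sorting the U-values too and doing a
-- single monotone two-pointer sweep over the two sorted lists (objective: alternative algorithm).

def pvINF : Int := 10 ^ 10

-- ===== PORT A =====
def checkUR (X : List (Int × Int × String)) : Int :=
  let p := X.foldl
    (fun (p : PySem.Dict Int (List Int) × PySem.Dict Int (List Int)) t =>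
      let x := t.1; let y := t.2.1; let u := t.2.2
      let p1 := if u == "U" then p.1.modify (y - x) [] (fun l => l ++ [y]) else p.1
      let p2 := if u == "L" then p.2.modify (y - x) [] (fun l => l ++ [y]) else p.2
      (p1, p2))
    (PySem.Dict.empty, PySem.Dict.empty)
  let AU := p.1
  let AR := p.2
  AU.keys.foldl
    (fun ret x =>
      if !(AR.contains x) then ret
      else
        -- ARX.sort(); ARX.append(INF)
        let ARX := PySem.List.sorted (AR.getD x []) (fun v => v) false ++ [pvINF]
        (AU.getD x []).foldl
          (fun ret xi =>
            let u := PySem.List.bisectLeft ARX xi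
            -- ARX[u]: with the INF sentinel, u < ARX.length whenever xi ≤ INF (always the case on Dom),
            -- so the getD default is never consulted on the claimed inputs
            let v := ARX.getD u pvINF
            if v == pvINF then ret
            else min ret ((v - xi) * 10))
          ret)
    pvINF

-- ===== PORT B =====
-- 'while j < len(ls) and ls[j] < xi: j += 1'
def pvAdvance (ls : List Int) (xi : Int) (j : Nat) : Nat :=
  if h : j < ls.length then
    if ls[j] < xi then pvAdvance ls xi (j + 1) else j
  else j
termination_by ls.length - j

-- 'for xi in sorted(AU[k]): …' with the persistent pointer j
def pvSweep (ls : List Int) (us : List Int) (j : Nat) (ret : Int) : Int :=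
  match us with
  | [] => ret
  | xi :: rest =>
    let j' := pvAdvance ls xi j
    let ret' := if j' < ls.length then min ret ((ls.getD j' 0 - xi) * 10) else ret
    pvSweep ls rest j' ret'

def checkUR_alt (X : List (Int × Int × String)) : Int :=
  let p := X.foldl
    (fun (p : PySem.Dict Int (List Int) × PySem.Dict Int (List Int)) t =>
      let x := t.1; let y := t.2.1; let u := t.2.2
      if u == "U" then (p.1.modify (y - x) [] (fun l => l ++ [y]), p.2)
      else if u == "L" then (p.1, p.2.modify (y - x) [] (fun l => l ++ [y]))
      else p)
    (PySem.Dict.empty, PySem.Dict.empty)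
  let AU := p.1
  let AR := p.2
  AU.keys.foldl
    (fun ret k =>
      if AR.contains k then
        pvSweep (PySem.List.sorted (AR.getD k []) (fun v => v) false)
                (PySem.List.sorted (AU.getD k []) (fun v => v) false) 0 ret
      else ret)
    pvINF

-- ===== PRECONDITION & SPEC =====
def Spec_checkUR (X : List (Int × Int × String)) (out : Int) : Prop := out = checkUR_alt X
instance (X : List (Int × Int × String)) (out : Int) : Decidable (Spec_checkUR X out) := by unfold Spec_checkUR; infer_instance

-- ===== CLAIM (what is proved, stated in full; the proofs are below) =====
def Claim_equal_checkUR : Prop := ∀ (X : List (Int × Int × String)), Dom_checkUR X → Spec_checkUR X (checkUR X)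

-- ===== LEMMAS AND PROOFS =====

-- "n is the bisect_left position of xi in ls"
def pvPos (ls : List Int) (xi : Int) (n : Nat) : Prop :=
  n ≤ ls.length ∧ (∀ j (hj : j < ls.length), j < n → ls[j] < xi) ∧
    (∀ j (hj : j < ls.length), n ≤ j → xi ≤ ls[j])

theorem pvPos_unique {ls : List Int} {xi : Int} {n m : Nat}
    (hn : pvPos ls xi n) (hm : pvPos ls xi m) : n = m := by
  by_contra hne
  rcases Nat.lt_or_ge n m with h | h
  · have hlt : n < ls.length := lt_of_lt_of_le h hm.1
    exact absurd (hn.2.2 n hlt le_rfl) (not_le.mpr (hm.2.1 n hlt h))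
  · have h' : m < n := by omega
    have hlt : m < ls.length := lt_of_lt_of_le h' hn.1
    exact absurd (hm.2.2 m hlt le_rfl) (not_le.mpr (hn.2.1 m hlt h'))

theorem pvPos_bisect (ls : List Int) (xi : Int) (hs : ls.Pairwise (· ≤ ·)) :
    pvPos ls xi (PySem.List.bisectLeft ls xi) := by
  obtain ⟨h1, h2, h3⟩ := PySem.List.bisectLeft_spec ls xi hs
  exact ⟨h1, h2, h3⟩

theorem pvPos_shrink {ls : List Int} {xi : Int} {n : Nat} (hxi : xi ≤ pvINF)
    (h : pvPos (ls ++ [pvINF]) xi n) : n ≤ ls.length ∧ pvPos ls xi n := by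
  have hlen : (ls ++ [pvINF]).length = ls.length + 1 := by simp
  have hn : n ≤ ls.length := by
    by_contra hgt
    have hn' : ls.length < n := Nat.lt_of_not_le hgt
    have hi : ls.length < (ls ++ [pvINF]).length := by omega
    have := h.2.1 ls.length hi hn'
    have : pvINF < xi := by
      have hg : (ls ++ [pvINF])[ls.length]'hi = pvINF := by
        simp [List.getElem_append_right]
      rwa [hg] at this
    omega
  refine ⟨hn, hn, ?_, ?_⟩
  · intro j hj hjn
    have hj' : j < (ls ++ [pvINF]).length := by omega
    have := h.2.1 j hj' hjn
    rwa [List.getElem_append_left hj] at this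
  · intro j hj hnj
    have hj' : j < (ls ++ [pvINF]).length := by omega
    have := h.2.2 j hj' hnj
    rwa [List.getElem_append_left hj] at this

theorem pvAdvance_pos (ls : List Int) (xi : Int) :
    ∀ j, ls.Pairwise (· ≤ ·) → j ≤ ls.length →
      (∀ i (hi : i < ls.length), i < j → ls[i] < xi) →
      pvPos ls xi (pvAdvance ls xi j) := by
  intro j
  induction j using pvAdvance.induct ls xi with
  | case1 j h hlt ih =>
    intro hs hj hpre
    rw [pvAdvance, dif_pos h, if_pos hlt]
    refine ih hs h ?_
    intro i hi hij
    rcases Nat.lt_or_ge i j with h' | h'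
    · exact hpre i hi h'
    · have : i = j := by omega
      subst this; exact hlt
  | case2 j h hge =>
    intro hs hj hpre
    rw [pvAdvance, dif_pos h, if_neg hge]
    refine ⟨le_of_lt h, hpre, ?_⟩
    intro i hi hji
    have hx : xi ≤ ls[j] := not_lt.mp hge
    rcases Nat.lt_or_ge j i with h' | h'
    · exact le_trans hx (List.pairwise_iff_getElem.mp hs j i h hi h')
    · have : i = j := by omega
      subst this; exact hx
  | case3 j h =>
    intro hs hj hpre
    rw [pvAdvance, dif_neg h]
    have : j = ls.length := by omega
    subst this
    exact ⟨le_rfl, hpre, fun i hi hji => by omega⟩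

-- A's inner-loop body, with ls the sorted L-list (ARX = ls ++ [INF])
def pvFBis (ls : List Int) (ret : Int) (xi : Int) : Int :=
  if (ls ++ [pvINF]).getD (PySem.List.bisectLeft (ls ++ [pvINF]) xi) pvINF == pvINF then ret
  else min ret (((ls ++ [pvINF]).getD (PySem.List.bisectLeft (ls ++ [pvINF]) xi) pvINF - xi) * 10)

theorem pvSweep_eq (ls : List Int) (hs : ls.Pairwise (· ≤ ·))
    (hlb : ∀ v ∈ ls, v < pvINF) :
    ∀ (us : List Int) (j : Nat) (ret : Int), us.Pairwise (· ≤ ·) →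
      (∀ v ∈ us, v < pvINF) → j ≤ ls.length →
      (∀ i (hi : i < ls.length), i < j → ∀ xi ∈ us, ls[i] < xi) →
      pvSweep ls us j ret = us.foldl (pvFBis ls) ret := by
  have hsapp : (ls ++ [pvINF]).Pairwise (· ≤ ·) := by
    rw [List.pairwise_append]
    exact ⟨hs, List.pairwise_singleton _ _, fun a ha b hb => by
      simp at hb; subst hb; exact le_of_lt (hlb a ha)⟩
  intro us
  induction us with
  | nil => intro j ret _ _ _ _; simp [pvSweep]
  | cons xi rest ih =>
    intro j ret hus hub hj hpre
    have hxi : xi < pvINF := hub xi (by simp)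
    -- the advanced pointer is the bisect position
    have hposA : pvPos ls xi (pvAdvance ls xi j) :=
      pvAdvance_pos ls xi j hs hj (fun i hi hij => hpre i hi hij xi (by simp))
    have hposB' : pvPos (ls ++ [pvINF]) xi (PySem.List.bisectLeft (ls ++ [pvINF]) xi) :=
      pvPos_bisect _ _ hsapp
    obtain ⟨hble, hposB⟩ := pvPos_shrink (le_of_lt hxi) hposB'
    have hjb : pvAdvance ls xi j = PySem.List.bisectLeft (ls ++ [pvINF]) xi :=
      pvPos_unique hposA hposB
    set b := PySem.List.bisectLeft (ls ++ [pvINF]) xi with hb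
    -- one step of each loop produces the same ret'
    have hstep : (if pvAdvance ls xi j < ls.length
          then min ret ((ls.getD (pvAdvance ls xi j) 0 - xi) * 10) else ret)
        = pvFBis ls ret xi := by
      rw [hjb]
      unfold pvFBis
      rcases Nat.lt_or_ge b ls.length with hlt | hge
      · have hlt' : b < (ls ++ [pvINF]).length := by simp; omega
        have hgv : (ls ++ [pvINF]).getD b pvINF = ls[b] := by
          rw [List.getD_eq_getElem _ _ hlt', List.getElem_append_left hlt]
        have hne : (ls[b] == pvINF) = false := by
          simp [Int.ne_of_lt (hlb _ (ls.getElem_mem hlt))]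
        rw [← hb, if_pos hlt, List.getD_eq_getElem _ _ hlt, hgv, hne]
        simp
      · have hbe : b = ls.length := by omega
        have hgv : (ls ++ [pvINF]).getD b pvINF = pvINF := by
          rw [hbe, List.getD_eq_getElem _ _ (by simp)]
          simp
        rw [← hb, if_neg (Nat.not_lt.mpr hge), hgv]
        simp
    show pvSweep ls (xi :: rest) j ret = _
    conv_lhs => rw [pvSweep]
    rw [hstep, List.foldl_cons]
    refine ih (pvAdvance ls xi j) (pvFBis ls ret xi)
      (List.Pairwise.sublist (List.sublist_cons_self xi rest) hus)
      (fun v hv => hub v (by simp [hv])) (hjb ▸ hble) ?_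
    intro i hi hij xi' hxi'
    have h1 : ls[i] < xi := hposA.2.1 i hi hij
    have h2 : xi ≤ xi' := (List.pairwise_cons.mp hus).1 xi' hxi'
    omega

-- pvFBis is right-commutative, so the fold may consume the U-list in any order
theorem pvFBis_rcomm (ls : List Int) (ret : Int) (a b : Int) :
    pvFBis ls (pvFBis ls ret a) b = pvFBis ls (pvFBis ls ret b) a := by
  unfold pvFBis
  split_ifs <;> simp [min_assoc, min_comm (((_ : Int) - a) * 10)]

theorem pvFoldFBis_perm (ls : List Int) {us us' : List Int} (h : us.Perm us') (ret : Int) :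
    us.foldl (pvFBis ls) ret = us'.foldl (pvFBis ls) ret :=
  @List.Perm.foldl_eq _ _ (pvFBis ls) us us' ⟨pvFBis_rcomm ls⟩ h ret

-- every value stored in the two dictionaries is a y-coordinate of X, hence < INF on Dom
def pvBnd (d : PySem.Dict Int (List Int)) : Prop :=
  ∀ (k : Int), ∀ v ∈ d.getD k [], v < pvINF

theorem pvBuild_bnd (X : List (Int × Int × String)) :
    ∀ (p : PySem.Dict Int (List Int) × PySem.Dict Int (List Int)),
      (∀ t ∈ X, t.2.1 < pvINF) → pvBnd p.1 → pvBnd p.2 →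
      pvBnd (X.foldl
        (fun p t =>
          let x := t.1; let y := t.2.1; let u := t.2.2
          let p1 := if u == "U" then p.1.modify (y - x) [] (fun l => l ++ [y]) else p.1
          let p2 := if u == "L" then p.2.modify (y - x) [] (fun l => l ++ [y]) else p.2
          (p1, p2)) p).1 ∧
      pvBnd (X.foldl
        (fun p t =>
          let x := t.1; let y := t.2.1; let u := t.2.2
          let p1 := if u == "U" then p.1.modify (y - x) [] (fun l => l ++ [y]) else p.1
          let p2 := if u == "L" then p.2.modify (y - x) [] (fun l => l ++ [y]) else p.2
          (p1, p2)) p).2 := by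
  induction X with
  | nil => intro p _ h1 h2; exact ⟨h1, h2⟩
  | cons t X ih =>
    intro p hX h1 h2
    rw [List.foldl_cons]
    refine ih _ (fun t' ht' => hX t' (by simp [ht'])) ?_ ?_ <;>
    · intro k v hv
      simp only at hv
      first
      | (split_ifs at hv with hu
         · rw [PySem.Dict.getD_modify] at hv
           split_ifs at hv with hk
           · rcases List.mem_append.mp hv with h | h
             · exact h1 _ _ h
             · simp at h; subst h; exact hX t (by simp)
           · exact h1 _ _ hv
         · exact h1 _ _ hv)
      | (split_ifs at hv with hu
         · rw [PySem.Dict.getD_modify] at hv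
           split_ifs at hv with hk
           · rcases List.mem_append.mp hv with h | h
             · exact h2 _ _ h
             · simp at h; subst h; exact hX t (by simp)
           · exact h2 _ _ hv
         · exact h2 _ _ hv)

-- the two dictionary-building folds are the same function
theorem pvBuild_eq (X : List (Int × Int × String))
    (p : PySem.Dict Int (List Int) × PySem.Dict Int (List Int)) :
    X.foldl
      (fun p t =>
        let x := t.1; let y := t.2.1; let u := t.2.2
        if u == "U" then (p.1.modify (y - x) [] (fun l => l ++ [y]), p.2)
        else if u == "L" then (p.1, p.2.modify (y - x) [] (fun l => l ++ [y]))
        else p) p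
    = X.foldl
      (fun p t =>
        let x := t.1; let y := t.2.1; let u := t.2.2
        let p1 := if u == "U" then p.1.modify (y - x) [] (fun l => l ++ [y]) else p.1
        let p2 := if u == "L" then p.2.modify (y - x) [] (fun l => l ++ [y]) else p.2
        (p1, p2)) p := by
  refine PySem.List.foldl_congr_mem _ _ _ _ ?_
  intro p t _
  simp only []
  by_cases hU : t.2.2 == "U"
  · have hL : (t.2.2 == "L") = false := by
      rw [beq_iff_eq] at hU; simp [hU]
    simp [hU, hL]
  · simp only [Bool.not_eq_true] at hU
    by_cases hL : t.2.2 == "L" <;> simp [hU, hL]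

-- ===== VERDICT (by name: the statement is the Claim_ definition above) =====
theorem checkUR_spec : Claim_equal_checkUR := by
  intro X hdom
  unfold Spec_checkUR checkUR checkUR_alt
  rw [pvBuild_eq]
  have hy : ∀ t ∈ X, t.2.1 < pvINF := by
    intro t ht
    unfold Dom_checkUR at hdom
    rw [List.all_eq_true] at hdom
    have := hdom t ht
    simp only [Bool.and_eq_true, pvDomInt, decide_eq_true_eq] at this
    unfold pvINF; omega
  obtain ⟨hAU, hAR⟩ := pvBuild_bnd X (PySem.Dict.empty, PySem.Dict.empty) hy
    (by intro k v hv; simp [PySem.Dict.getD_empty] at hv)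
    (by intro k v hv; simp [PySem.Dict.getD_empty] at hv)
  set p := X.foldl
      (fun p (t : Int × Int × String) =>
        let x := t.1; let y := t.2.1; let u := t.2.2
        let p1 := if u == "U" then p.1.modify (y - x) [] (fun l => l ++ [y]) else p.1
        let p2 := if u == "L" then p.2.modify (y - x) [] (fun l => l ++ [y]) else p.2
        (p1, p2)) (PySem.Dict.empty, PySem.Dict.empty) with hp
  refine (PySem.List.foldl_congr_mem _ _ _ _ ?_).symm
  intro ret k _
  by_cases hc : p.2.contains k
  · simp only [hc, Bool.not_true, if_pos, Bool.false_eq_true, if_false]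
    set ls := PySem.List.sorted (p.2.getD k []) (fun v => v) false with hls
    set us0 := p.1.getD k [] with hus0
    have hlsp : ls.Pairwise (· ≤ ·) := PySem.List.sorted_pairwise _ _
    have hlsb : ∀ v ∈ ls, v < pvINF := fun v hv =>
      hAR k v ((PySem.List.mem_sorted _ _ _ _).mp hv)
    have husp : (PySem.List.sorted us0 (fun v => v) false).Pairwise (· ≤ ·) :=
      PySem.List.sorted_pairwise _ _
    have husb : ∀ v ∈ PySem.List.sorted us0 (fun v => v) false, v < pvINF := fun v hv =>
      hAU k v ((PySem.List.mem_sorted _ _ _ _).mp hv)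
    rw [pvSweep_eq ls hlsp hlsb _ 0 ret husp husb (Nat.zero_le _) (by omega)]
    rw [pvFoldFBis_perm ls (PySem.List.sorted_perm us0 (fun v => v) false) ret]
    rfl
  · simp [hc]
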